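-- pv_equiv track=rewrite | github.com/tawhid885/Codeforces | dragons.py | result
-- ===== SOURCE A (Python) =====
-- def result(n, arr):
--     arr.sort()
--     for i in range(len(arr)):
--         if arr[i][0] < n:
--             n +=arr[i][1]
--         else:
--             return "NO"
--
--     return "YES"
-- ===== SOURCE B (Python) =====
-- def result(n, arr):
--     arr.sort()
--     # Backwards pass: req = minimal initial strength that defeats the whole
--     # (sorted) suffix seen so far; None means the suffix is empty.
--     # Defeating dragon (h, b) needs strength >= h + 1, and afterwards the
--     # remaining suffix needs req, i.e. strength >= req - b before the fight.
--     req = None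
--     for h, b in reversed(arr):
--         req = h + 1 if req is None else max(h + 1, req - b)
--     return "YES" if req is None or n >= req else "NO"
-- ===== Notes on version B (the rewrite author's own statement) =====
-- stated objective: alternative
-- what changed: Replaces A's forward greedy accumulate-and-early-return loop by a backwards pass that computes the minimal initial strength needed for each suffix (req = max(h+1, req - b)), followed by one comparison n >= req.
import Mathlib
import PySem

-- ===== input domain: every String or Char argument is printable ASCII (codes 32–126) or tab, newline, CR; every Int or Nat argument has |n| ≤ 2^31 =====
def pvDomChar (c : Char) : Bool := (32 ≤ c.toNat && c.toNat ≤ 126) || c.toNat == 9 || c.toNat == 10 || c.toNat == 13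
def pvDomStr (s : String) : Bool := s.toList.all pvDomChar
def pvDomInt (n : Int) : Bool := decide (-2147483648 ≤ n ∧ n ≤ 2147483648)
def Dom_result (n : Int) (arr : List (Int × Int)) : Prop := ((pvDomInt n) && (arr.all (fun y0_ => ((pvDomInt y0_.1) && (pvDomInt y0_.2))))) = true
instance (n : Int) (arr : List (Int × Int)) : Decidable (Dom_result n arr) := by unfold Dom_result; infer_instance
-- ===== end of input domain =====

-- B replaces A's forward greedy accumulate-and-early-return loop by a backwards
-- pass computing the minimal initial strength needed for each suffix, then one
-- comparison n >= req ('alternative' decomposition, same cost).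
-- A sorts arr in place (observable mutation); the equivalence proved here is about
-- the RETURN value only (B performs the same in-place sort).

-- ===== PORT A =====
-- the for-loop of A over the sorted list, with early return "NO"
def resultLoop (n : Int) : List (Int × Int) → String
  | [] => "YES"
  | (h, b) :: t => if h < n then resultLoop (n + b) t else "NO"

def result (n : Int) (arr : List (Int × Int)) : String :=
  resultLoop n (PySem.List.sorted2 arr (·.1) (·.2))

-- ===== PORT B =====
-- B's backwards loop: 'for h, b in reversed(arr)' updating the Optional req
def reqStep (req : Option Int) (p : Int × Int) : Option Int :=
  match req with
  | none => some (p.1 + 1)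
  | some r => some (max (p.1 + 1) (r - p.2))

def result_alt (n : Int) (arr : List (Int × Int)) : String :=
  let s := PySem.List.sorted2 arr (·.1) (·.2)
  let req := s.reverse.foldl reqStep none
  match req with
  | none => "YES"
  | some r => if n ≥ r then "YES" else "NO"

-- ===== PRECONDITION & SPEC =====
def Spec_result (n : Int) (arr : List (Int × Int)) (out : String) : Prop := out = result_alt n arr
instance (n : Int) (arr : List (Int × Int)) (out : String) : Decidable (Spec_result n arr out) := by unfold Spec_result; infer_instance

-- ===== CLAIM (what is proved, stated in full; the proofs are below) =====
def Claim_equal_result : Prop := ∀ (n : Int) (arr : List (Int × Int)), Dom_result n arr → Spec_result n arr (result n arr)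

-- ===== LEMMAS AND PROOFS =====
lemma loop_eq_req (s : List (Int × Int)) : ∀ n : Int,
    resultLoop n s = (match s.foldr (fun p acc => reqStep acc p) none with
      | none => "YES"
      | some r => if n ≥ r then "YES" else "NO") := by
  induction s with
  | nil => intro n; simp [resultLoop]
  | cons p t ih =>
    intro n
    obtain ⟨h, b⟩ := p
    simp only [resultLoop, List.foldr_cons]
    rw [ih (n + b)]
    cases hr : t.foldr (fun p acc => reqStep acc p) none with
    | none =>
      simp only [reqStep]
      by_cases hc : h < n
      · rw [if_pos hc, if_pos (by omega)]
      · rw [if_neg hc, if_neg (by omega)]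
    | some r =>
      simp only [reqStep]
      by_cases hc : h < n
      · rw [if_pos hc]
        by_cases h2 : n + b ≥ r
        · rw [if_pos h2, if_pos (by omega)]
        · rw [if_neg h2, if_neg (by omega)]
      · rw [if_neg hc, if_neg (by omega)]

-- ===== VERDICT (by name: the statement is the Claim_ definition above) =====
theorem result_spec : Claim_equal_result := by
  intro n arr _
  show result n arr = result_alt n arr
  unfold result result_alt
  simp only [List.foldl_reverse]
  exact loop_eq_req _ n
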